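-- pv_equiv track=rewrite | github.com/AleLV10/Monitor-de-prducci-n | pestañas.py | sumar_campos
-- ===== SOURCE A (Python) =====
-- def sumar_campos(lista_tuplas):
--     acumulador = {}
--     detalles = {}
--     # Itera sobre cada tupla en la lista
--     for folio,solicitante,observaciones,unidades in lista_tuplas:
--         # Si la clave ya está en el diccionario, suma el valor
--         if solicitante  in acumulador:
--             acumulador[solicitante ] += unidades
--         # Si la clave no está en el diccionario, inicializa con el valor
--         else:
--             acumulador[solicitante ] = unidades
--         detalles[solicitante ] = (folio,solicitante, observaciones)
--         # Convierte el diccionario acumulador de nuevo en una lista de tuplas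
--     resultado = [
--         ( detalles[solicitante ][0], detalles[solicitante ][1],detalles[solicitante ][2],acumulador[solicitante ])
--         for solicitante  in acumulador
--     ]
--     return resultado
-- ===== SOURCE B (Python) =====
-- def _ultimo_detalle(lista_tuplas, solicitante):
--     # last row for this solicitante (details-win-last)
--     return next(t for t in reversed(lista_tuplas) if t[1] == solicitante)
--
--
-- def _total_unidades(lista_tuplas, solicitante):
--     return sum(t[3] for t in lista_tuplas if t[1] == solicitante)
--
--
-- def sumar_campos(lista_tuplas):
--     # staged: dedup keys in first-appearance order, then per-key scans
--     claves = list(dict.fromkeys(t[1] for t in lista_tuplas))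
--     resultado = []
--     for s in claves:
--         u = _ultimo_detalle(lista_tuplas, s)
--         resultado.append((u[0], s, u[2], _total_unidades(lista_tuplas, s)))
--     return resultado
-- ===== Notes on version B (the rewrite author's own statement) =====
-- stated objective: alternative
-- what changed: Replaces the single-pass dict accumulation by a staged nested-scan algorithm with no accumulator dict: one dedup pass over the keys, then for each key a full scan summing its units and a reverse scan picking its last details.
import Mathlib
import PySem

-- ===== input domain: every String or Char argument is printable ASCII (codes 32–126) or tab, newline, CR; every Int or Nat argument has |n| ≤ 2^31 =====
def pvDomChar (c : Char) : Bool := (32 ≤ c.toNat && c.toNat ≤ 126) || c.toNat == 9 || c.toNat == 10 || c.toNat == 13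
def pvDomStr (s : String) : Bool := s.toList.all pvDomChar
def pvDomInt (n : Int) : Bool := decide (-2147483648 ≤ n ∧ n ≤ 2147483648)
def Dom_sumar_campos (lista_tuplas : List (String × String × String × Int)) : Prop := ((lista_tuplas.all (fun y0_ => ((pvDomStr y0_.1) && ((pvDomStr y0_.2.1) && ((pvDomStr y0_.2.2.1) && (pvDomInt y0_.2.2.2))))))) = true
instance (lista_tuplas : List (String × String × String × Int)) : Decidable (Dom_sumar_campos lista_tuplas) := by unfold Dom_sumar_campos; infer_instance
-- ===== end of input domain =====

-- B replaces A's single-pass accumulation into two dicts by a staged nested-scan algorithm with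
-- no accumulator: dedup the keys once, then per key a full scan for the sum and a reverse scan
-- for the last details (objective: alternative; same results, different algorithm).

-- ===== PORT A =====
def sumar_campos (lista_tuplas : List (String × String × String × Int)) : List (String × String × String × Int) :=
  let st := lista_tuplas.foldl
    (fun (st : PySem.Dict String Int × PySem.Dict String (String × String × String)) t =>
      let acumulador := if st.1.contains t.2.1
        then st.1.insert t.2.1 (st.1.getD t.2.1 0 + t.2.2.2)
        else st.1.insert t.2.1 t.2.2.2
      (acumulador, st.2.insert t.2.1 (t.1, t.2.1, t.2.2.1)))
    (PySem.Dict.empty, PySem.Dict.empty)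
  st.1.keys.map (fun s =>
    ((st.2.getD s ("", "", "")).1, (st.2.getD s ("", "", "")).2.1,
      (st.2.getD s ("", "", "")).2.2, st.1.getD s 0))

-- ===== PORT B =====
-- next(t for t in reversed(lista) if t[1] == s): find? on the reversed list; none = StopIteration,
-- unreachable from sumar_campos_alt since s is drawn from the keys present in the list.
def ultimo_detalle (lista_tuplas : List (String × String × String × Int)) (solicitante : String) :
    String × String × String × Int :=
  (lista_tuplas.reverse.find? (fun t => t.2.1 == solicitante)).getD ("", solicitante, "", 0)

def total_unidades (lista_tuplas : List (String × String × String × Int)) (solicitante : String) : Int :=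
  ((lista_tuplas.filter (fun t => t.2.1 == solicitante)).map (fun t => t.2.2.2)).sum

def sumar_campos_alt (lista_tuplas : List (String × String × String × Int)) : List (String × String × String × Int) :=
  let claves := PySem.List.dedup (lista_tuplas.map (fun t => t.2.1))
  claves.foldl (fun resultado s =>
    let u := ultimo_detalle lista_tuplas s
    resultado ++ [(u.1, s, u.2.2.1, total_unidades lista_tuplas s)]) []

-- ===== PRECONDITION & SPEC =====
def Spec_sumar_campos (lista_tuplas : List (String × String × String × Int)) (out : List (String × String × String × Int)) : Prop := out = sumar_campos_alt lista_tuplas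
instance (lista_tuplas : List (String × String × String × Int)) (out : List (String × String × String × Int)) : Decidable (Spec_sumar_campos lista_tuplas out) := by unfold Spec_sumar_campos; infer_instance

-- ===== CLAIM (what is proved, stated in full; the proofs are below) =====
def Claim_equal_sumar_campos : Prop := ∀ (lista_tuplas : List (String × String × String × Int)), Dom_sumar_campos lista_tuplas → Spec_sumar_campos lista_tuplas (sumar_campos lista_tuplas)

-- ===== LEMMAS AND PROOFS =====

-- A's accumulator loop body, with the contains-test folded away (0 + u = u on a fresh key)
def fAcum (d : PySem.Dict String Int) (t : String × String × String × Int) : PySem.Dict String Int :=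
  d.insert t.2.1 (d.getD t.2.1 0 + t.2.2.2)

def fDet (d : PySem.Dict String (String × String × String)) (t : String × String × String × Int) :
    PySem.Dict String (String × String × String) :=
  d.insert t.2.1 (t.1, t.2.1, t.2.2.1)

lemma foldA_eq (l : List (String × String × String × Int)) (d : PySem.Dict String Int) :
    l.foldl (fun d t => if d.contains t.2.1
      then d.insert t.2.1 (d.getD t.2.1 0 + t.2.2.2)
      else d.insert t.2.1 t.2.2.2) d = l.foldl fAcum d := by
  apply PySem.List.foldl_congr_mem
  intro d t _
  by_cases hc : d.contains t.2.1
  · simp [hc, fAcum]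
  · simp only [Bool.not_eq_true] at hc
    simp [hc, fAcum, PySem.Dict.getD_of_not_contains _ _ hc]

lemma acum_getD (l : List (String × String × String × Int)) (d : PySem.Dict String Int) (k : String) :
    (l.foldl fAcum d).getD k 0
      = d.getD k 0 + ((l.filter (fun t => t.2.1 == k)).map (fun t => t.2.2.2)).sum := by
  induction l generalizing d with
  | nil => simp
  | cons t rest ih =>
    simp only [List.foldl_cons, ih, List.filter_cons]
    by_cases hk : t.2.1 = k
    · simp [fAcum, hk, PySem.Dict.getD_insert_self]
      ring
    · have : (t.2.1 == k) = false := by simp [hk]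
      simp [fAcum, this, PySem.Dict.getD_insert_of_ne _ _ _ (fun h => hk h.symm)]

lemma det_getD (l : List (String × String × String × Int))
    (d : PySem.Dict String (String × String × String)) (k : String)
    (dflt : String × String × String) :
    (l.foldl fDet d).getD k dflt
      = match l.reverse.find? (fun t => t.2.1 == k) with
        | some t => (t.1, t.2.1, t.2.2.1)
        | none => d.getD k dflt := by
  induction l generalizing d with
  | nil => simp
  | cons t rest ih =>
    simp only [List.foldl_cons, ih, List.reverse_cons, List.find?_append]
    cases hr : rest.reverse.find? (fun t => t.2.1 == k) with
    | some u => simp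
    | none =>
      by_cases hk : t.2.1 = k
      · simp [hk, fDet, PySem.Dict.getD_insert_self]
      · have : (t.2.1 == k) = false := by simp [hk]
        simp [this, fDet, PySem.Dict.getD_insert_of_ne _ _ _ (fun h => hk h.symm)]

-- ===== VERDICT (by name: the statement is the Claim_ definition above) =====
theorem sumar_campos_spec : Claim_equal_sumar_campos := by
  intro l _
  unfold Spec_sumar_campos sumar_campos sumar_campos_alt
  dsimp only
  have hsplit := PySem.List.foldl_prod_mk
    (fun (d : PySem.Dict String Int) (t : String × String × String × Int) =>
      if PySem.Dict.contains d t.2.1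
      then d.insert t.2.1 (d.getD t.2.1 0 + t.2.2.2)
      else d.insert t.2.1 t.2.2.2)
    (fun (d : PySem.Dict String (String × String × String)) (t : String × String × String × Int) =>
      d.insert t.2.1 (t.1, t.2.1, t.2.2.1))
    l PySem.Dict.empty PySem.Dict.empty
  rw [hsplit]
  simp only [foldA_eq]
  have hfd : (fun (d : PySem.Dict String (String × String × String))
      (t : String × String × String × Int) => d.insert t.2.1 (t.1, t.2.1, t.2.2.1)) = fDet := rfl
  simp only [hfd]
  rw [PySem.List.foldl_append_singleton_eq_map]
  -- keys of the accumulator are the deduped solicitantes in first-appearance order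
  have hkeys : (l.foldl fAcum PySem.Dict.empty).keys
      = PySem.List.dedup (l.map (fun t => t.2.1)) := by
    have h := PySem.Dict.keys_foldl_insert_key (l := l)
      (key := fun (t : String × String × String × Int) => t.2.1)
      (f := fun d t => d.getD t.2.1 0 + t.2.2.2) (d := PySem.Dict.empty)
    simpa [fAcum, PySem.Dict.keys_empty, PySem.Set.update, PySem.Set.ofList_eq_foldl] using h
  rw [hkeys]
  simp only [List.nil_append]
  apply List.map_congr_left
  intro s hs
  have hmem : s ∈ l.map (fun t => t.2.1) := (PySem.List.mem_dedup _ _).mp hs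
  have hsome : (l.reverse.find? (fun t => t.2.1 == s)).isSome := by
    rw [List.find?_isSome]
    obtain ⟨t, ht, hts⟩ := List.mem_map.mp hmem
    exact ⟨t, List.mem_reverse.mpr ht, by simp [hts]⟩
  obtain ⟨u, hu⟩ := Option.isSome_iff_exists.mp hsome
  have hus : u.2.1 = s := by simpa using List.find?_some hu
  rw [det_getD, acum_getD, hu]
  simp [ultimo_detalle, total_unidades, hu, hus]
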